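-- pv_equiv track=rewrite | github.com/NguyenDucKhiem/NeuralNetwork | ReadFile.py | ConvertWeek
-- ===== SOURCE A (Python) =====
-- month_day = [31, 28, 31, 30, 31, 30, 31, 31, 30, 31, 30, 31]
--
-- def ConvertWeek(month, day):
--     '''
--     Convert month and day to week\n
--     month: month want to convert\n
--     day: day want to conver\n
--     return the week have day and month requested
--     '''
--     # init sum day of month
--     sum_day = 0
--     # foreach 0->month - 1 and plus days of each month
--     for i in range(0, month - 1):
--         # plus days of each month
--         sum_day += month_day[i]
--      # plus day
--     sum_day += day
--     # count the previous week
--     week = int(sum_day / 7)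
--     # if the day into the new week, plus day
--     if sum_day % 7 > 1:
--         # plus day
--         week += 1
--     # return week have day and month requested
--     return week
-- ===== SOURCE B (Python) =====
-- # Cumulative-days table lookup plus one integer ceiling division: no loop, no float arithmetic.
-- DAYS_BEFORE_MONTH = {
--     2: 31, 3: 59, 4: 90, 5: 120, 6: 151, 7: 181,
--     8: 212, 9: 243, 10: 273, 11: 304, 12: 334, 13: 365,
-- }
--
-- def ConvertWeek(month, day):
--     sum_day = DAYS_BEFORE_MONTH.get(month, 0) + day
--     return (sum_day + 5) // 7
-- ===== Notes on version B (the rewrite author's own statement) =====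
-- stated objective: idiomatic
-- what changed: Replaces A's per-month summation loop with a precomputed cumulative-days dictionary lookup and A's float int(sum/7) plus mod-test rounding with a single integer ceiling division; Pre_ excludes month >= 14 (A raises IndexError) and negative running day totals, nonsense inputs on which A's float truncation toward zero is an accident of its implementation.
-- outside the precondition, e.g. on ConvertWeek(1, -1): A returns 1, B returns 0
import Mathlib
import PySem

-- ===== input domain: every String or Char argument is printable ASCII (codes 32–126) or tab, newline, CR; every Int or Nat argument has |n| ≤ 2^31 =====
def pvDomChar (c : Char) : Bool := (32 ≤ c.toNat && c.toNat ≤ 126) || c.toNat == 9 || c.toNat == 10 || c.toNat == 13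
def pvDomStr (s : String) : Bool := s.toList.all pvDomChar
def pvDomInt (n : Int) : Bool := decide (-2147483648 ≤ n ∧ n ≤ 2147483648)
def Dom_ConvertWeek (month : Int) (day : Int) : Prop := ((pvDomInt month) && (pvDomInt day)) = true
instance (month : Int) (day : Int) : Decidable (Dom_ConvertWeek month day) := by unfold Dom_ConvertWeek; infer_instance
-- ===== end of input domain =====

-- B replaces A's per-month summation loop and its float int(sum/7)+mod-test rounding by a
-- cumulative-days table lookup and one integer ceiling division (idiomatic; return value only).

-- ===== PORT A =====
def monthDay : List Int := [31, 28, 31, 30, 31, 30, 31, 31, 30, 31, 30, 31]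

-- int(sum_day / 7) truncates toward zero; exact as Int.tdiv for |sum_day| ≤ 2^31 + 365 (the
-- float quotient is correctly rounded and cannot cross an integer there).
def ConvertWeek (month : Int) (day : Int) : Int :=
  let sumDay : Int := (PySem.List.pyRange 0 (month - 1) 1).foldl
      (fun s i => s + PySem.List.pyGetD monthDay i 0) 0
  let sumDay := sumDay + day
  let week := Int.tdiv sumDay 7
  if PySem.Int.mod sumDay 7 > 1 then week + 1 else week

-- ===== PORT B =====
def daysBeforeMonth : PySem.Dict Int Int :=
  PySem.Dict.mk [(2, 31), (3, 59), (4, 90), (5, 120), (6, 151), (7, 181),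
                 (8, 212), (9, 243), (10, 273), (11, 304), (12, 334), (13, 365)]

def ConvertWeek_alt (month : Int) (day : Int) : Int :=
  let sumDay := PySem.Dict.getD daysBeforeMonth month 0 + day
  PySem.Int.floordiv (sumDay + 5) 7

-- ===== PRECONDITION & SPEC =====
-- Helper for Pre_ only: days of the year before the given month (0 outside 2..13).
def pvDaysBefore (m : Int) : Int :=
  if m = 2 then 31 else if m = 3 then 59 else if m = 4 then 90 else if m = 5 then 120
  else if m = 6 then 151 else if m = 7 then 181 else if m = 8 then 212 else if m = 9 then 243
  else if m = 10 then 273 else if m = 11 then 304 else if m = 12 then 334 else if m = 13 then 365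
  else 0

-- Pre_ excludes month ≥ 14, where A's loop indexes past month_day and raises IndexError, and
-- negative running day totals (day < -days_before(month)), nonsense inputs on which A's float
-- truncation toward zero is an accident of its implementation.
def Pre_ConvertWeek (month : Int) (day : Int) : Prop :=
  month ≤ 13 ∧ 0 ≤ pvDaysBefore month + day
instance (month : Int) (day : Int) : Decidable (Pre_ConvertWeek month day) := by
  unfold Pre_ConvertWeek; infer_instance
def pvWitness_ConvertWeek : Int × Int := (3, 15)

def Spec_ConvertWeek (month : Int) (day : Int) (out : Int) : Prop := out = ConvertWeek_alt month day
instance (month : Int) (day : Int) (out : Int) : Decidable (Spec_ConvertWeek month day out) := by unfold Spec_ConvertWeek; infer_instance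

-- ===== CLAIM (what is proved, stated in full; the proofs are below) =====
def Claim_equal_ConvertWeek : Prop := ∀ (month : Int) (day : Int), Dom_ConvertWeek month day → Pre_ConvertWeek month day → Spec_ConvertWeek month day (ConvertWeek month day)

-- ===== LEMMAS AND PROOFS =====
-- On a nonnegative day total, A's truncated division plus mod test is the ceiling division ⌈(s-1)/7⌉.
theorem week_arith (s : Int) (hs : 0 ≤ s) :
    (if PySem.Int.mod s 7 > 1 then Int.tdiv s 7 + 1 else Int.tdiv s 7) =
    PySem.Int.floordiv (s + 5) 7 := by
  rw [PySem.Int.mod_eq_emod_of_pos (by norm_num : (0:Int) < 7),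
      PySem.Int.floordiv_eq_ediv_of_pos (by norm_num : (0:Int) < 7)]
  have h : s.tdiv 7 = s / 7 + if 0 ≤ s ∨ (7:Int) ∣ s then 0 else 1 := by
    rw [Int.tdiv_eq_ediv, show Int.sign 7 = 1 from rfl]
  rw [h]
  split_ifs <;> omega

-- B's table lookup is empty below month 2.
set_option maxHeartbeats 1000000 in
theorem getD_of_le_one (month : Int) (h : month ≤ 1) :
    PySem.Dict.getD daysBeforeMonth month 0 = 0 := by
  simp only [daysBeforeMonth, PySem.Dict.getD_eq_get?_getD, PySem.Dict.get?_mk_cons, beq_iff_eq]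
  split_ifs <;> first | omega | rfl

-- A's loop sum over the months before `month` equals B's table entry, and both equal pvDaysBefore.
set_option maxHeartbeats 1000000 in
theorem loop_sum_eq_table (month : Int) (h2 : 2 ≤ month) (h13 : month ≤ 13) :
    (PySem.List.pyRange 0 (month - 1) 1).foldl
      (fun s i => s + PySem.List.pyGetD monthDay i 0) 0 =
    PySem.Dict.getD daysBeforeMonth month 0 := by
  interval_cases month <;> decide

set_option maxHeartbeats 1000000 in
theorem pvDaysBefore_eq_getD (month : Int) (h13 : month ≤ 13) :
    pvDaysBefore month = PySem.Dict.getD daysBeforeMonth month 0 := by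
  by_cases h : month ≤ 1
  · rw [getD_of_le_one month h]
    simp only [pvDaysBefore]; split_ifs <;> omega
  · interval_cases month <;> decide

-- ===== VERDICT (by name: the statement is the Claim_ definition above) =====
theorem ConvertWeek_spec : Claim_equal_ConvertWeek := by
  intro month day _ hpre
  obtain ⟨h13, hsum⟩ := hpre
  unfold Spec_ConvertWeek ConvertWeek ConvertWeek_alt
  rw [pvDaysBefore_eq_getD month h13] at hsum
  by_cases h : month ≤ 1
  · rw [PySem.List.pyRange_one_eq_nil (by omega)]
    simp only [List.foldl_nil, zero_add]
    rw [getD_of_le_one month h] at hsum ⊢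
    simpa using week_arith day (by omega)
  · rw [loop_sum_eq_table month (by omega) h13]
    exact week_arith _ hsum
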